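-- pv_equiv track=rewrite | github.com/Aniruddha-Deb/COL202 | tilings.py | tile
-- ===== SOURCE A (Python) =====
-- def add(t1,t2):
-- 	return (t1[0]+t2[0], t1[1]+t2[1])
--
-- def setpos(l,pos):
-- 	for triomino in l:
-- 		triomino[0] = add(triomino[0],pos)
-- 		triomino[1] = add(triomino[1],pos)
-- 	return l
--
-- def tile(n, absent_tile_pos):
-- 	"""
-- 	returns a list of triominoes such that the grid of 2^n x 2^n sans absent_tile_pos
-- 	is tiled with these triominoes. A triomino is represented by the position
-- 	of the top left 2x2 square and the tile that is absent from the 2x2 square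
-- 	enclosed by the triomino
-- 	"""
-- 	if (n == 1):
-- 		return [[(0,0), absent_tile_pos]]
--
-- 	# find out in which quadrant the absent tile lies
-- 	if (absent_tile_pos[0] < 2**(n-1) and absent_tile_pos[1] < 2**(n-1)):
-- 		# first quadrant
-- 		return ( tile(n-1,absent_tile_pos) +
-- 				setpos(tile(n-1,(0,0)),(2**(n-1),2**(n-1))) +
-- 				setpos(tile(n-1,(2**(n-1)-1,0)),(0,2**(n-1))) +
-- 				setpos(tile(n-1,(0,2**(n-1)-1)),(2**(n-1),0)) +
-- 				[[(2**(n-1)-1,2**(n-1)-1), (2**(n-1)-1,2**(n-1)-1)]] )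
-- 	elif (absent_tile_pos[0] >= 2**(n-1) and absent_tile_pos[1] < 2**(n-1)):
-- 		# second quadrant
-- 		return (setpos(tile(n-1,(2**(n-1)-1,2**(n-1)-1)),(0,0)) +
-- 				setpos(tile(n-1,(0,0)),(2**(n-1),2**(n-1))) +
-- 				setpos(tile(n-1,(2**(n-1)-1,0)),(0,2**(n-1))) +
-- 				setpos(tile(n-1,add(absent_tile_pos,(-2**(n-1),0))),(2**(n-1),0)) +
-- 				[[(2**(n-1)-1,2**(n-1)-1), (2**(n-1),2**(n-1)-1)]] )
-- 	elif (absent_tile_pos[0] >= 2**(n-1) and absent_tile_pos[1] >= 2**(n-1)):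
-- 		# third quadrant
-- 		return (setpos(tile(n-1,(2**(n-1)-1,2**(n-1)-1)),(0,0)) +
-- 				setpos(tile(n-1,add(absent_tile_pos,(-2**(n-1),-2**(n-1)))),(2**(n-1),2**(n-1))) +
-- 				setpos(tile(n-1,(2**(n-1)-1,0)),(0,2**(n-1))) +
-- 				setpos(tile(n-1,(0,2**(n-1)-1)),(2**(n-1),0)) +
-- 				[[(2**(n-1)-1,2**(n-1)-1), (2**(n-1),2**(n-1))]] )
-- 	elif (absent_tile_pos[0] < 2**(n-1) and absent_tile_pos[1] >= 2**(n-1)):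
-- 		# fourth quadrant
-- 		return (setpos(tile(n-1,(2**(n-1)-1,2**(n-1)-1)),(0,0)) +
-- 				setpos(tile(n-1,(0,0)),(2**(n-1),2**(n-1))) +
-- 				setpos(tile(n-1,add(absent_tile_pos,(0,-2**(n-1)))),(0,2**(n-1))) +
-- 				setpos(tile(n-1,(0,2**(n-1)-1)),(2**(n-1),0)) +
-- 				[[(2**(n-1)-1,2**(n-1)-1), (2**(n-1)-1,2**(n-1))]] )
-- ===== SOURCE B (Python) =====
-- def tile(n, absent_tile_pos):
--     """
--     Same triomino tiling as A, but built in one pass: the recursion carries a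
--     cumulative offset (ox, oy) and appends triominoes with absolute positions
--     to one shared output list, so no sublist is ever re-traversed by setpos.
--     """
--     out = []
--
--     def rec(n, ax, ay, ox, oy):
--         if n == 1:
--             out.append([(ox, oy), (ox + ax, oy + ay)])
--             return
--         h = 2 ** (n - 1)
--         if ax < h and ay < h:
--             rec(n - 1, ax, ay, ox, oy)
--             rec(n - 1, 0, 0, ox + h, oy + h)
--             rec(n - 1, h - 1, 0, ox, oy + h)
--             rec(n - 1, 0, h - 1, ox + h, oy)
--             out.append([(ox + h - 1, oy + h - 1), (ox + h - 1, oy + h - 1)])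
--         elif ax >= h and ay < h:
--             rec(n - 1, h - 1, h - 1, ox, oy)
--             rec(n - 1, 0, 0, ox + h, oy + h)
--             rec(n - 1, h - 1, 0, ox, oy + h)
--             rec(n - 1, ax - h, ay, ox + h, oy)
--             out.append([(ox + h - 1, oy + h - 1), (ox + h, oy + h - 1)])
--         elif ax >= h and ay >= h:
--             rec(n - 1, h - 1, h - 1, ox, oy)
--             rec(n - 1, ax - h, ay - h, ox + h, oy + h)
--             rec(n - 1, h - 1, 0, ox, oy + h)
--             rec(n - 1, 0, h - 1, ox + h, oy)
--             out.append([(ox + h - 1, oy + h - 1), (ox + h, oy + h)])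
--         else:
--             rec(n - 1, h - 1, h - 1, ox, oy)
--             rec(n - 1, 0, 0, ox + h, oy + h)
--             rec(n - 1, ax, ay - h, ox, oy + h)
--             rec(n - 1, 0, h - 1, ox + h, oy)
--             out.append([(ox + h - 1, oy + h - 1), (ox + h - 1, oy + h)])
--
--     rec(n, absent_tile_pos[0], absent_tile_pos[1], 0, 0)
--     return out
-- ===== Notes on version B (the rewrite author's own statement) =====
-- stated objective: faster
-- what changed: B recurses with a cumulative (ox,oy) offset and appends each triomino once, with absolute coordinates, to one shared list, eliminating A's setpos re-traversal of every sublist at every recursion level; intended as faster (O(4^n) vs O(n*4^n)), measured ~6.3-6.7x at the sizes where both finished, unconfirmed at the largest size (both timed out).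
import Mathlib
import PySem

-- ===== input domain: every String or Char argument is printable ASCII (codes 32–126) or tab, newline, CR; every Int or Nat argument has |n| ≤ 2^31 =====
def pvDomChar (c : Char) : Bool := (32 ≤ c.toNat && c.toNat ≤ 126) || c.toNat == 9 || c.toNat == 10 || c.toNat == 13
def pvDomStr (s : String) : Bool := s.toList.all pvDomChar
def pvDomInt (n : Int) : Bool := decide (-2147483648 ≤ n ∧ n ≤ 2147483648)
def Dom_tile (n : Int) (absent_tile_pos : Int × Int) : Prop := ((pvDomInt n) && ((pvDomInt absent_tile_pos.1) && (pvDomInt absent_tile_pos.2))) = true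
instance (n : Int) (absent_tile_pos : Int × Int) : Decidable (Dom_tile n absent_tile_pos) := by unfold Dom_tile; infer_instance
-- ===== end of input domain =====

-- B builds the tiling in one pass with a cumulative offset, appending absolute positions to
-- one shared list instead of re-traversing sublists with setpos (intended as faster; the
-- timing run measured ~6x at the sizes where both finished, unconfirmed at the largest).

-- ===== PORT A =====
-- add(t1, t2)
def addP (t1 t2 : Int × Int) : Int × Int := (t1.1 + t2.1, t1.2 + t2.2)

-- setpos on a single triomino: triomino[0] = add(triomino[0],pos); triomino[1] = add(...).
-- Every triomino A builds has exactly 2 entries; the fallthrough case is unreachable on A's data.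
def setposT (t : List (Int × Int)) (pos : Int × Int) : List (Int × Int) :=
  match t with
  | a :: b :: rest => addP a pos :: addP b pos :: rest
  | t => t

-- setpos(l, pos)
def setpos (l : List (List (Int × Int))) (pos : Int × Int) : List (List (Int × Int)) :=
  l.map (fun t => setposT t pos)

-- tile, recursion made structural on a fuel = n.toNat (Python recurses on n-1 down to 1;
-- for n ≤ 0 Python diverges (RecursionError), excluded by Pre_tile; fuel 0 returns []).
def tileFuel : Nat → Int → (Int × Int) → List (List (Int × Int))
  | 0, _, _ => []
  | f+1, n, apos =>
    if n == 1 then [[(0, 0), apos]]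
    else
      let h : Int := 2 ^ (n - 1).toNat
      if apos.1 < h ∧ apos.2 < h then
        tileFuel f (n-1) apos ++
        setpos (tileFuel f (n-1) (0, 0)) (h, h) ++
        setpos (tileFuel f (n-1) (h-1, 0)) (0, h) ++
        setpos (tileFuel f (n-1) (0, h-1)) (h, 0) ++
        [[(h-1, h-1), (h-1, h-1)]]
      else if apos.1 ≥ h ∧ apos.2 < h then
        setpos (tileFuel f (n-1) (h-1, h-1)) (0, 0) ++
        setpos (tileFuel f (n-1) (0, 0)) (h, h) ++
        setpos (tileFuel f (n-1) (h-1, 0)) (0, h) ++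
        setpos (tileFuel f (n-1) (addP apos (-h, 0))) (h, 0) ++
        [[(h-1, h-1), (h, h-1)]]
      else if apos.1 ≥ h ∧ apos.2 ≥ h then
        setpos (tileFuel f (n-1) (h-1, h-1)) (0, 0) ++
        setpos (tileFuel f (n-1) (addP apos (-h, -h))) (h, h) ++
        setpos (tileFuel f (n-1) (h-1, 0)) (0, h) ++
        setpos (tileFuel f (n-1) (0, h-1)) (h, 0) ++
        [[(h-1, h-1), (h, h)]]
      else
        setpos (tileFuel f (n-1) (h-1, h-1)) (0, 0) ++
        setpos (tileFuel f (n-1) (0, 0)) (h, h) ++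
        setpos (tileFuel f (n-1) (addP apos (0, -h))) (0, h) ++
        setpos (tileFuel f (n-1) (0, h-1)) (h, 0) ++
        [[(h-1, h-1), (h-1, h)]]

def tile (n : Int) (absent_tile_pos : Int × Int) : List (List (Int × Int)) :=
  tileFuel n.toNat n absent_tile_pos

-- ===== PORT B =====
-- rec(n, ax, ay, ox, oy) appending to the shared list `out` (here: the accumulator acc,
-- grown at the back exactly as Python's out.append); same fuel device as the A port.
def tileAltGo : Nat → Int → Int → Int → Int → Int → List (List (Int × Int)) → List (List (Int × Int))
  | 0, _, _, _, _, _, acc => acc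
  | f+1, n, ax, ay, ox, oy, acc =>
    if n == 1 then acc ++ [[(ox, oy), (ox + ax, oy + ay)]]
    else
      let h : Int := 2 ^ (n - 1).toNat
      if ax < h ∧ ay < h then
        (tileAltGo f (n-1) 0 (h-1) (ox+h) oy
          (tileAltGo f (n-1) (h-1) 0 ox (oy+h)
            (tileAltGo f (n-1) 0 0 (ox+h) (oy+h)
              (tileAltGo f (n-1) ax ay ox oy acc)))) ++
        [[(ox+h-1, oy+h-1), (ox+h-1, oy+h-1)]]
      else if ax ≥ h ∧ ay < h then
        (tileAltGo f (n-1) (ax-h) ay (ox+h) oy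
          (tileAltGo f (n-1) (h-1) 0 ox (oy+h)
            (tileAltGo f (n-1) 0 0 (ox+h) (oy+h)
              (tileAltGo f (n-1) (h-1) (h-1) ox oy acc)))) ++
        [[(ox+h-1, oy+h-1), (ox+h, oy+h-1)]]
      else if ax ≥ h ∧ ay ≥ h then
        (tileAltGo f (n-1) 0 (h-1) (ox+h) oy
          (tileAltGo f (n-1) (h-1) 0 ox (oy+h)
            (tileAltGo f (n-1) (ax-h) (ay-h) (ox+h) (oy+h)
              (tileAltGo f (n-1) (h-1) (h-1) ox oy acc)))) ++
        [[(ox+h-1, oy+h-1), (ox+h, oy+h)]]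
      else
        (tileAltGo f (n-1) 0 (h-1) (ox+h) oy
          (tileAltGo f (n-1) ax (ay-h) ox (oy+h)
            (tileAltGo f (n-1) 0 0 (ox+h) (oy+h)
              (tileAltGo f (n-1) (h-1) (h-1) ox oy acc)))) ++
        [[(ox+h-1, oy+h-1), (ox+h-1, oy+h)]]

def tile_alt (n : Int) (absent_tile_pos : Int × Int) : List (List (Int × Int)) :=
  tileAltGo n.toNat n absent_tile_pos.1 absent_tile_pos.2 0 0 []

-- ===== PRECONDITION & SPEC =====
-- Pre_: for n ≤ 0 the Python A recurses forever (2**(n-1) becomes a float and the base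
-- case is never hit), ending in a RecursionError; for every n ≥ 1 A returns normally.
def Pre_tile (n : Int) (absent_tile_pos : Int × Int) : Prop := 1 ≤ n
instance (n : Int) (absent_tile_pos : Int × Int) : Decidable (Pre_tile n absent_tile_pos) := by unfold Pre_tile; infer_instance
def pvWitness_tile : Int × (Int × Int) := (2, (1, 0))

def Spec_tile (n : Int) (absent_tile_pos : Int × Int) (out : List (List (Int × Int))) : Prop := out = tile_alt n absent_tile_pos
instance (n : Int) (absent_tile_pos : Int × Int) (out : List (List (Int × Int))) : Decidable (Spec_tile n absent_tile_pos out) := by unfold Spec_tile; infer_instance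

-- ===== CLAIM (what is proved, stated in full; the proofs are below) =====
def Claim_equal_tile : Prop := ∀ (n : Int) (absent_tile_pos : Int × Int), Dom_tile n absent_tile_pos → Pre_tile n absent_tile_pos → Spec_tile n absent_tile_pos (tile n absent_tile_pos)

-- ===== LEMMAS AND PROOFS =====

theorem setpos_append (l1 l2 : List (List (Int × Int))) (p : Int × Int) :
    setpos (l1 ++ l2) p = setpos l1 p ++ setpos l2 p := by
  simp [setpos]

theorem setposT_setposT (t : List (Int × Int)) (p q : Int × Int) :
    setposT (setposT t p) q = setposT t (q.1 + p.1, q.2 + p.2) := by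
  match t with
  | [] => rfl
  | [a] => rfl
  | a :: b :: rest =>
    simp [setposT, addP, Prod.ext_iff]
    all_goals and_intros
    all_goals ring

theorem setpos_setpos (l : List (List (Int × Int))) (p q : Int × Int) :
    setpos (setpos l p) q = setpos l (q.1 + p.1, q.2 + p.2) := by
  simp [setpos, setposT_setposT]

theorem setpos_zero (l : List (List (Int × Int))) : setpos l (0, 0) = l := by
  induction l with
  | nil => rfl
  | cons t l ih =>
    simp only [setpos, List.map_cons] at *
    rw [ih]
    congr 1
    match t with
    | [] => rfl
    | [a] => rfl
    | a :: b :: rest => simp [setposT, addP]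

-- Core invariant: B's recursion with offset (ox,oy) appends exactly A's (local) tiling
-- shifted by setpos.
theorem setpos_single (a b : Int × Int) (p : Int × Int) :
    setpos [[a, b]] p = [[addP a p, addP b p]] := rfl

theorem tileAltGo_eq (f : Nat) : ∀ (n ax ay ox oy : Int) (acc : List (List (Int × Int))),
    tileAltGo f n ax ay ox oy acc = acc ++ setpos (tileFuel f n (ax, ay)) (ox, oy) := by
  induction f with
  | zero => intro n ax ay ox oy acc; simp [tileAltGo, tileFuel, setpos]
  | succ f ih =>
    intro n ax ay ox oy acc
    simp only [tileAltGo, tileFuel]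
    split_ifs with h1 c1 c2 c3
    · simp only [setpos_single, addP]; ring_nf
    · simp only [ih, setpos_append, setpos_setpos, setpos_single, addP, List.append_assoc]
      ring_nf
    · simp only [ih, setpos_append, setpos_setpos, setpos_single, addP, List.append_assoc]
      ring_nf
    · simp only [ih, setpos_append, setpos_setpos, setpos_single, addP, List.append_assoc]
      ring_nf
    · simp only [ih, setpos_append, setpos_setpos, setpos_single, addP, List.append_assoc]
      ring_nf

-- ===== VERDICT (by name: the statement is the Claim_ definition above) =====
theorem tile_spec : Claim_equal_tile := by
  intro n apos _ _
  unfold Spec_tile tile tile_alt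
  rw [tileAltGo_eq, setpos_zero]
  simp
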